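-- pv_equiv track=rewrite | github.com/harneet2512/groundtruth | scripts/swebench/analyze_gt_check.py | map_calls_to_tasks
-- ===== SOURCE A (Python) =====
-- def map_calls_to_tasks(gt_calls, task_tool_calls, results):
--     """Map GT calls to task instance_ids using tool call matching.
--
--     Strategy: match gt_check calls by looking at which tasks had gt_check
--     in their Inspect conversation trace, then correlate by order.
--     """
--     # Get tasks that used gt_check, in order
--     tasks_with_gt_check = []
--     for iid, tc_list in task_tool_calls.items():
--         check_count = sum(1 for tc in tc_list if tc['function'] == 'gt_check')
--         if check_count > 0:
--             tasks_with_gt_check.append((iid, check_count))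
--
--     # Get gt_check calls from JSONL in order
--     check_calls = [c for c in gt_calls if c['tool'] == 'gt_check']
--
--     # Simple mapping: assign calls to tasks in order, respecting count per task
--     call_to_task = {}
--     call_idx = 0
--     for iid, count in tasks_with_gt_check:
--         for _ in range(count):
--             if call_idx < len(check_calls):
--                 call_to_task[call_idx] = iid
--                 call_idx += 1
--
--     # For unmapped calls, mark as unknown
--     for i in range(len(check_calls)):
--         if i not in call_to_task:
--             call_to_task[i] = "UNKNOWN"
--
--     return check_calls, call_to_task
-- ===== SOURCE B (Python) =====
-- def map_calls_to_tasks(gt_calls, task_tool_calls, results):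
--     """Map GT calls to task instance_ids using tool call matching."""
--     check_calls = [c for c in gt_calls if c['tool'] == 'gt_check']
--     # Cumulative boundaries: (running total of gt_check occurrences, instance_id)
--     bounds = []
--     total = 0
--     for iid, tc_list in task_tool_calls.items():
--         c = sum(1 for tc in tc_list if tc['function'] == 'gt_check')
--         if c:
--             total += c
--             bounds.append((total, iid))
--
--     def owner(i):
--         # the task owning call i is the first boundary strictly above i
--         for end, iid in bounds:
--             if i < end:
--                 return iid
--         return "UNKNOWN"
--
--     call_to_task = {i: owner(i) for i in range(len(check_calls))}
--     return check_calls, call_to_task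
-- ===== Notes on version B (the rewrite author's own statement) =====
-- stated objective: alternative
-- what changed: A assigns call indices to tasks sequentially with a mutable counter over a per-task nested loop and then backfills UNKNOWN in a second pass; B instead computes cumulative prefix-sum boundaries once and maps each call index independently to the first boundary strictly above it (UNKNOWN if none), in one pass.
import Mathlib
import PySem

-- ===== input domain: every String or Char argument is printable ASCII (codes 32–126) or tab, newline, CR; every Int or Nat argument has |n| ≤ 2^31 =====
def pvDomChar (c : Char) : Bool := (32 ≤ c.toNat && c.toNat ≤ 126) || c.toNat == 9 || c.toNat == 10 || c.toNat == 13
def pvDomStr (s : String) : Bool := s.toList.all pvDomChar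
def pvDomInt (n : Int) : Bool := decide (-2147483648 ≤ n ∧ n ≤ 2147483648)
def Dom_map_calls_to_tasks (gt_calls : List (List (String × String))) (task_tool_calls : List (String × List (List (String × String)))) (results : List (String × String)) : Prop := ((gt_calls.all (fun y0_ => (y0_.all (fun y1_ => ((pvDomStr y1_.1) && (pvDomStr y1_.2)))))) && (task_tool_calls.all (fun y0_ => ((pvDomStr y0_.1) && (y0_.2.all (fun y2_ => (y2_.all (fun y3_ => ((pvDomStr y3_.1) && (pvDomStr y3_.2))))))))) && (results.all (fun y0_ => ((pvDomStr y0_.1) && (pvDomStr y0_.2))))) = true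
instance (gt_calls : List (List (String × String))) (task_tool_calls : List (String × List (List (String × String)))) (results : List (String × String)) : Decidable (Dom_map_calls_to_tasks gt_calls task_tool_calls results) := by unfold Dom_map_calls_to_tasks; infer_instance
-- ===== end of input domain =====

-- B replaces A's sequential counter assignment (nested per-task loop plus a separate
-- UNKNOWN backfill pass over a dict) by cumulative prefix-sum boundaries and an
-- independent first-boundary-above lookup per call index (objective: alternative).

-- ===== PORT A =====
-- d[k] on a Python dict (first-match lookup on the association list; none = KeyError)
def pvGet (d : List (String × String)) (k : String) : Option String :=
  (PySem.Dict.mk d).get? k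

-- check_count = sum(1 for tc in tc_list if tc['function'] == 'gt_check')
def pvCountA (tc_list : List (List (String × String))) : Int :=
  tc_list.foldl (fun s tc => if pvGet tc "function" == some "gt_check" then s + 1 else s) 0

-- the tasks_with_gt_check loop
def pvTasksA (task_tool_calls : List (String × List (List (String × String)))) : List (String × Int) :=
  task_tool_calls.foldl (fun acc p =>
    if pvCountA p.2 > 0 then acc ++ [(p.1, pvCountA p.2)] else acc) []

-- body of 'for _ in range(count)': assign the next call index to iid if any remain
def pvAssign (n : Int) (iid : String) (st : PySem.Dict Int String × Int) :
    PySem.Dict Int String × Int :=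
  if st.2 < n then (st.1.insert st.2 iid, st.2 + 1) else st

def pvAssignTask (n : Int) (st : PySem.Dict Int String × Int) (p : String × Int) :
    PySem.Dict Int String × Int :=
  (PySem.List.pyRange 0 p.2 1).foldl (fun st _ => pvAssign n p.1 st) st

-- 'for i in range(len(check_calls)): if i not in call_to_task: call_to_task[i] = "UNKNOWN"'
def pvFill (n : Int) (d : PySem.Dict Int String) : PySem.Dict Int String :=
  (PySem.List.pyRange 0 n 1).foldl (fun d i => if d.contains i then d else d.insert i "UNKNOWN") d

def map_calls_to_tasks (gt_calls : List (List (String × String))) (task_tool_calls : List (String × List (List (String × String)))) (results : List (String × String)) : (List (List (String × String))) × (List (Int × String)) :=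
  let tasks_with_gt_check := pvTasksA task_tool_calls
  let check_calls := gt_calls.filter (fun c => pvGet c "tool" == some "gt_check")
  let st := tasks_with_gt_check.foldl (pvAssignTask (check_calls.length : Int))
      (PySem.Dict.empty, 0)
  let call_to_task := pvFill (check_calls.length : Int) st.1
  (check_calls, call_to_task.items)

-- ===== PORT B =====
-- the bounds-building loop: state (bounds, total); 'if c:' on an int is 'c ≠ 0'
def pvBoundsStep (st : List (Int × String) × Int) (p : String × List (List (String × String))) :
    List (Int × String) × Int :=
  let c := pvCountA p.2
  if c ≠ 0 then (st.1 ++ [(st.2 + c, p.1)], st.2 + c) else st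

def pvBounds (task_tool_calls : List (String × List (List (String × String)))) : List (Int × String) :=
  (task_tool_calls.foldl pvBoundsStep ([], 0)).1

-- owner(i): first boundary strictly above i, else "UNKNOWN"
def pvOwner (bounds : List (Int × String)) (i : Int) : String :=
  match bounds.find? (fun q => i < q.1) with
  | some q => q.2
  | none => "UNKNOWN"

def map_calls_to_tasks_alt (gt_calls : List (List (String × String))) (task_tool_calls : List (String × List (List (String × String)))) (results : List (String × String)) : (List (List (String × String))) × (List (Int × String)) :=
  let check_calls := gt_calls.filter (fun c => pvGet c "tool" == some "gt_check")
  let bounds := pvBounds task_tool_calls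
  (check_calls,
   (List.range check_calls.length).map (fun (i : Nat) => ((i : Int), pvOwner bounds (i : Int))))

-- ===== PRECONDITION & SPEC =====
-- Pre_ excludes exactly the inputs where Python A raises KeyError: a gt_call without a
-- 'tool' key or a task tool call without a 'function' key.
def Pre_map_calls_to_tasks (gt_calls : List (List (String × String))) (task_tool_calls : List (String × List (List (String × String)))) (results : List (String × String)) : Prop :=
  (∀ c ∈ gt_calls, (pvGet c "tool").isSome = true) ∧
  (∀ p ∈ task_tool_calls, ∀ tc ∈ p.2, (pvGet tc "function").isSome = true)
instance (gt_calls : List (List (String × String))) (task_tool_calls : List (String × List (List (String × String)))) (results : List (String × String)) : Decidable (Pre_map_calls_to_tasks gt_calls task_tool_calls results) := by unfold Pre_map_calls_to_tasks; infer_instance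

def pvWitness_map_calls_to_tasks : (List (List (String × String))) × (List (String × List (List (String × String)))) × (List (String × String)) :=
  ([[("tool", "gt_check")], [("tool", "other")]],
   [("task_1", [[("function", "gt_check")]]), ("task_2", [])],
   [("task_1", "ok")])

def Spec_map_calls_to_tasks (gt_calls : List (List (String × String))) (task_tool_calls : List (String × List (List (String × String)))) (results : List (String × String)) (out : (List (List (String × String))) × (List (Int × String))) : Prop := out = map_calls_to_tasks_alt gt_calls task_tool_calls results
instance (gt_calls : List (List (String × String))) (task_tool_calls : List (String × List (List (String × String)))) (results : List (String × String)) (out : (List (List (String × String))) × (List (Int × String))) : Decidable (Spec_map_calls_to_tasks gt_calls task_tool_calls results out) := by unfold Spec_map_calls_to_tasks; infer_instance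

-- ===== CLAIM (what is proved, stated in full; the proofs are below) =====
def Claim_equal_map_calls_to_tasks : Prop := ∀ (gt_calls : List (List (String × String))) (task_tool_calls : List (String × List (List (String × String)))) (results : List (String × String)), Dom_map_calls_to_tasks gt_calls task_tool_calls results → Pre_map_calls_to_tasks gt_calls task_tool_calls results → Spec_map_calls_to_tasks gt_calls task_tool_calls results (map_calls_to_tasks gt_calls task_tool_calls results)

-- ===== LEMMAS AND PROOFS =====

-- proof-side helpers: the per-task gt_check count as a Nat, the filtered count list,
-- and the flat expansion both programs' results are characterised by
def pvCountB (tc_list : List (List (String × String))) : Nat :=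
  tc_list.countP (fun tc => pvGet tc "function" == some "gt_check")

def pvLof (ttc : List (String × List (List (String × String)))) : List (String × Nat) :=
  (ttc.filter (fun p => pvCountB p.2 > 0)).map (fun p => (p.1, pvCountB p.2))

def pvExpanded (ttc : List (String × List (List (String × String)))) : List String :=
  (pvLof ttc).flatMap (fun q => List.replicate q.2 q.1)

-- A's per-task counter equals the Nat count
theorem pvCountA_eq (tcl : List (List (String × String))) :
    pvCountA tcl = (pvCountB tcl : Int) := by
  simpa [pvCountA, pvCountB] using
    PySem.List.foldl_count_if (fun tc => pvGet tc "function" == some "gt_check") tcl 0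

theorem pvTasksA_eq (ttc : List (String × List (List (String × String)))) :
    pvTasksA ttc = (ttc.filter (fun p => pvCountA p.2 > 0)).map (fun p => (p.1, pvCountA p.2)) := by
  simpa [pvTasksA] using
    PySem.List.foldl_append_if (fun p => pvCountA p.2 > 0)
      (fun p => (p.1, pvCountA p.2)) ttc []

-- A's (iid, count) list expands to the flat expansion list
theorem flat_tasksA_eq (ttc : List (String × List (List (String × String)))) :
    (pvTasksA ttc).flatMap (fun q => List.replicate q.2.toNat q.1) = pvExpanded ttc := by
  rw [pvTasksA_eq]
  unfold pvExpanded pvLof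
  simp only [pvCountA_eq, gt_iff_lt, Nat.cast_pos]
  induction ttc with
  | nil => rfl
  | cons p ttc ih =>
    simp only [List.filter_cons]
    by_cases h : 0 < pvCountB p.2
    · simp [h, ih]
    · simp [h, ih]

-- the state A's assignment loop maintains, parametrised by the flat list assigned so far
def pvStE (n : Nat) (e : List String) : PySem.Dict Int String × Int :=
  (PySem.Dict.mk (PySem.List.enumerate (e.take n) 0), ((min e.length n : Nat) : Int))

theorem assign_fold (n : Nat) (iid : String) (l : List Int) (e : List String) :
    l.foldl (fun st _ => pvAssign (n : Int) iid st) (pvStE n e) =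
      pvStE n (e ++ List.replicate l.length iid) := by
  induction l generalizing e with
  | nil => simp
  | cons x l ih =>
    rw [List.foldl_cons]
    by_cases h : e.length < n
    · have hmin : min e.length n = e.length := by omega
      have htk : e.take n = e := List.take_of_length_le (by omega)
      have htk' : (e ++ [iid]).take n = e ++ [iid] := by
        apply List.take_of_length_le; simp; omega
      have hc : (PySem.Dict.mk (PySem.List.enumerate e 0)).contains ((e.length : Nat) : Int) = false := by
        rw [PySem.Dict.contains_eq_decide_mem_keys, PySem.Dict.keys_mk,
            PySem.List.map_fst_enumerate]
        simp [PySem.List.mem_pyRange_one]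
      have hins : ((PySem.Dict.mk (PySem.List.enumerate e 0)).insert ((e.length : Nat) : Int) iid) =
          PySem.Dict.mk (PySem.List.enumerate (e ++ [iid]) 0) := by
        have h1 : ((PySem.Dict.mk (PySem.List.enumerate e 0)).insert ((e.length : Nat) : Int) iid) =
            PySem.Dict.mk (((PySem.Dict.mk (PySem.List.enumerate e 0)).insert ((e.length : Nat) : Int) iid).items) := rfl
        rw [h1, PySem.Dict.items_insert_of_not_contains _ iid hc,
            PySem.List.enumerate_append]
        simp [PySem.List.enumerate_cons, PySem.List.enumerate_nil]
      have hstep : pvAssign (n : Int) iid (pvStE n e) = pvStE n (e ++ [iid]) := by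
        simp only [pvAssign, pvStE, hmin, htk, htk']
        rw [if_pos (by exact_mod_cast h)]
        rw [hins]
        have h2 : min (e ++ [iid]).length n = e.length + 1 := by simp; omega
        rw [h2]
        refine Prod.ext rfl ?_
        push_cast
        ring
      rw [hstep, ih]
      have : e ++ [iid] ++ List.replicate l.length iid =
          e ++ List.replicate (x :: l).length iid := by
        simp [List.append_assoc, List.replicate_succ]
      rw [this]
    · have hstep : pvAssign (n : Int) iid (pvStE n e) = pvStE n e := by
        have hmin : min e.length n = n := by omega
        simp [pvAssign, pvStE, hmin]
      have hrep : ∀ (m : Nat), pvStE n (e ++ List.replicate m iid) = pvStE n e := by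
        intro m
        unfold pvStE
        have h1 : (e ++ List.replicate m iid).take n = e.take n :=
          List.take_append_of_le_length (Nat.le_of_not_lt h)
        have h2 : min (e ++ List.replicate m iid).length n = min e.length n := by
          simp; omega
        rw [h1, h2]
      rw [hstep, ih, hrep, hrep]

theorem tasks_fold (n : Nat) (L : List (String × Int)) (e : List String) :
    L.foldl (pvAssignTask (n : Int)) (pvStE n e) =
      pvStE n (e ++ L.flatMap (fun q => List.replicate q.2.toNat q.1)) := by
  induction L generalizing e with
  | nil => simp
  | cons q L ih =>
    have h1 : pvAssignTask (n : Int) (pvStE n e) q =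
        pvStE n (e ++ List.replicate q.2.toNat q.1) := by
      unfold pvAssignTask
      rw [assign_fold]
      simp [PySem.List.length_pyRange_one]
    rw [List.foldl_cons, h1, ih, List.flatMap_cons, List.append_assoc]

-- the UNKNOWN backfill appends pairs (i, "UNKNOWN") for the unassigned indices
theorem fill_loop (n : Nat) (E : List String) (m : Nat) (j : Int)
    (hj : j = (n : Int) - (m : Nat)) (hkj : ((min E.length n : Nat) : Int) ≤ j) :
    (PySem.List.pyRange j (n : Int) 1).foldl
        (fun d i => if d.contains i then d else d.insert i "UNKNOWN")
        (PySem.Dict.mk (PySem.List.enumerate (E.take n) 0 ++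
          (PySem.List.pyRange ((min E.length n : Nat) : Int) j 1).map (fun i => (i, "UNKNOWN")))) =
      PySem.Dict.mk (PySem.List.enumerate (E.take n) 0 ++
          (PySem.List.pyRange ((min E.length n : Nat) : Int) (n : Int) 1).map (fun i => (i, "UNKNOWN"))) := by
  induction m generalizing j with
  | zero =>
    have : j = (n : Int) := by omega
    subst this
    rw [PySem.List.pyRange_one_eq_nil le_rfl]
    rfl
  | succ m ih =>
    by_cases hlt : j < (n : Int)
    · rw [PySem.List.pyRange_one_cons hlt, List.foldl_cons]
      have hk : (E.take n).length = min E.length n := by simp [Nat.min_comm]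
      have hc : (PySem.Dict.mk (PySem.List.enumerate (E.take n) 0 ++
          (PySem.List.pyRange ((min E.length n : Nat) : Int) j 1).map (fun i => (i, "UNKNOWN")))).contains j = false := by
        rw [PySem.Dict.contains_eq_decide_mem_keys, PySem.Dict.keys_mk]
        simp only [List.map_append, List.map_map]
        rw [PySem.List.map_fst_enumerate, hk]
        simp only [decide_eq_false_iff_not, List.mem_append, List.mem_map,
          Function.comp_def, PySem.List.mem_pyRange_one, not_or]
        refine ⟨by omega, ?_⟩
        rintro ⟨x, hx, rfl⟩
        omega
      simp only [hc, Bool.false_eq_true, if_false]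
      have hins : ((PySem.Dict.mk (PySem.List.enumerate (E.take n) 0 ++
          (PySem.List.pyRange ((min E.length n : Nat) : Int) j 1).map (fun i => (i, "UNKNOWN")))).insert j "UNKNOWN") =
          PySem.Dict.mk (PySem.List.enumerate (E.take n) 0 ++
          (PySem.List.pyRange ((min E.length n : Nat) : Int) (j + 1) 1).map (fun i => (i, "UNKNOWN"))) := by
        have := PySem.Dict.items_insert_of_not_contains
          (PySem.Dict.mk (PySem.List.enumerate (E.take n) 0 ++
            (PySem.List.pyRange ((min E.length n : Nat) : Int) j 1).map (fun i => (i, "UNKNOWN"))))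
          (k := j) "UNKNOWN" hc
        cases hd : (PySem.Dict.mk (PySem.List.enumerate (E.take n) 0 ++
            (PySem.List.pyRange ((min E.length n : Nat) : Int) j 1).map (fun i => (i, "UNKNOWN")))).insert j "UNKNOWN" with
        | mk items =>
          rw [hd] at this; simp at this
          rw [PySem.List.pyRange_one_succ_right hkj]
          simp [this]
      rw [hins]
      exact ih (j + 1) (by omega) (by omega)
    · have : j = (n : Int) := by omega
      subst this
      rw [PySem.List.pyRange_one_eq_nil le_rfl]
      rfl

-- A's finished association list, as an indexed map over the expansion
theorem final_list_eq (n : Nat) (E : List String) :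
    PySem.List.enumerate (E.take n) 0 ++
      (PySem.List.pyRange ((min E.length n : Nat) : Int) (n : Int) 1).map (fun i => (i, "UNKNOWN")) =
    (List.range n).map (fun (i : Nat) => ((i : Int), E.getD i "UNKNOWN")) := by
  apply List.ext_getElem
  · simp [PySem.List.length_enumerate, PySem.List.length_pyRange_one, Nat.min_comm]
    omega
  · intro i h1 h2
    have hk : (PySem.List.enumerate (E.take n) 0).length = min E.length n := by
      simp [Nat.min_comm]
    by_cases hik : i < min E.length n
    · rw [List.getElem_append_left (by omega)]
      have hE : i < E.length := by omega
      rw [PySem.List.getElem_enumerate, List.getElem_map, List.getElem_range,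
        List.getElem_take, List.getD_eq_getElem E "UNKNOWN" hE]
      simp
    · have hn : i < n := by simpa using h2
      rw [List.getElem_append_right (by omega)]
      have hidx : i - (PySem.List.enumerate (E.take n) 0).length <
          ((PySem.List.pyRange ((min E.length n : Nat) : Int) (n : Int) 1).map
            (fun i => (i, "UNKNOWN"))).length := by
        simp [PySem.List.length_pyRange_one, hk]; omega
      rw [List.getElem_map, List.getElem_map, List.getElem_range,
        PySem.List.getElem_pyRange_one]
      have hge : E.length ≤ i := by omega
      have hD : E.getD i "UNKNOWN" = "UNKNOWN" := by
        rw [List.getD_eq_getElem?_getD, List.getElem?_eq_none (by omega)]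
        rfl
      rw [hD, hk]
      refine Prod.ext ?_ rfl
      simp
      omega

-- B-side characterisation: the bounds list is the prefix-sum scan of the count list
def pvBoundsOf (t0 : Int) : List (String × Nat) → List (Int × String)
  | [] => []
  | q :: L => (t0 + (q.2 : Int), q.1) :: pvBoundsOf (t0 + (q.2 : Int)) L

theorem bounds_fold (ttc : List (String × List (List (String × String)))) :
    ∀ (b0 : List (Int × String)) (t0 : Int),
      ttc.foldl pvBoundsStep (b0, t0) =
        (b0 ++ pvBoundsOf t0 (pvLof ttc), t0 + ((ttc.map (fun p => pvCountB p.2)).sum : Int)) := by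
  induction ttc with
  | nil => intro b0 t0; simp [pvLof, pvBoundsOf]
  | cons p ttc ih =>
    intro b0 t0
    rw [List.foldl_cons]
    by_cases h : 0 < pvCountB p.2
    · have hstep : pvBoundsStep (b0, t0) p =
          (b0 ++ [(t0 + (pvCountB p.2 : Int), p.1)], t0 + (pvCountB p.2 : Int)) := by
        have hne : ((pvCountB p.2 : Int)) ≠ 0 := by exact_mod_cast h.ne'
        simp only [pvBoundsStep, pvCountA_eq]
        rw [if_pos hne]
      rw [hstep, ih]
      have hL : pvLof (p :: ttc) = (p.1, pvCountB p.2) :: pvLof ttc := by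
        simp [pvLof, List.filter_cons, h]
      rw [hL]
      simp [pvBoundsOf, List.append_assoc]
      ring
    · have h0 : pvCountB p.2 = 0 := by omega
      have hstep : pvBoundsStep (b0, t0) p = (b0, t0) := by
        simp [pvBoundsStep, pvCountA_eq, h0]
      rw [hstep, ih]
      have hL : pvLof (p :: ttc) = pvLof ttc := by
        simp [pvLof, List.filter_cons, h0]
      rw [hL]
      simp [h0]

-- owner(i) on the prefix-sum bounds reads the flat expansion
theorem owner_eq (L : List (String × Nat)) :
    ∀ (t0 : Int) (i : Nat), (∀ q ∈ L, 0 < q.2) →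
      pvOwner (pvBoundsOf t0 L) (t0 + (i : Int)) =
        (L.flatMap (fun q => List.replicate q.2 q.1)).getD i "UNKNOWN" := by
  induction L with
  | nil => intro t0 i _; simp [pvBoundsOf, pvOwner]
  | cons q L ih =>
    intro t0 i hpos
    have hq : 0 < q.2 := hpos q (by simp)
    simp only [pvBoundsOf, List.flatMap_cons]
    by_cases h : i < q.2
    · have hfind : ((t0 + (q.2 : Int), q.1) :: pvBoundsOf (t0 + (q.2 : Int)) L).find?
          (fun r => t0 + (i : Int) < r.1) = some (t0 + (q.2 : Int), q.1) := by
        rw [List.find?_cons_of_pos]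
        simp; omega
      simp only [pvOwner, hfind]
      rw [List.getD_eq_getElem?_getD, List.getElem?_append_left (by simpa using h)]
      simp [h]
    · have hfind : ((t0 + (q.2 : Int), q.1) :: pvBoundsOf (t0 + (q.2 : Int)) L).find?
          (fun r => t0 + (i : Int) < r.1) =
          (pvBoundsOf (t0 + (q.2 : Int)) L).find? (fun r => t0 + (i : Int) < r.1) := by
        rw [List.find?_cons_of_neg]
        simp; omega
      have hcast : t0 + (i : Int) = (t0 + (q.2 : Int)) + ((i - q.2 : Nat) : Int) := by
        push_cast [Nat.cast_sub (Nat.le_of_not_lt h)]; ring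
      have := ih (t0 + (q.2 : Int)) (i - q.2) (fun r hr => hpos r (by simp [hr]))
      simp only [pvOwner] at this ⊢
      rw [hfind, hcast, this]
      rw [List.getD_eq_getElem?_getD, List.getD_eq_getElem?_getD,
        List.getElem?_append_right (by simpa using Nat.le_of_not_lt h)]
      simp

theorem map_calls_to_tasks_eq (gt_calls : List (List (String × String)))
    (ttc : List (String × List (List (String × String))))
    (results : List (String × String)) :
    map_calls_to_tasks gt_calls ttc results = map_calls_to_tasks_alt gt_calls ttc results := by
  unfold map_calls_to_tasks map_calls_to_tasks_alt
  set check_calls := gt_calls.filter (fun c => pvGet c "tool" == some "gt_check") with hcc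
  set n := check_calls.length with hn
  refine Prod.ext rfl ?_
  show (pvFill (n : Int) ((pvTasksA ttc).foldl (pvAssignTask (n : Int))
      (PySem.Dict.empty, 0)).1).items = _
  have h0 : (PySem.Dict.empty, (0 : Int)) = pvStE n [] := by
    simp [pvStE, PySem.Dict.empty]
  rw [h0, tasks_fold, flat_tasksA_eq]
  set E := pvExpanded ttc with hE
  have hst1 : (pvStE n ([] ++ E)).1 = PySem.Dict.mk (PySem.List.enumerate (E.take n) 0) := by
    simp [pvStE]
  rw [hst1]
  unfold pvFill
  have hfill := fill_loop n E (n - min E.length n) (((min E.length n : Nat) : Int)) ?_ le_rfl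
  · have hr0 : PySem.List.pyRange (((min E.length n : Nat) : Int)) (((min E.length n : Nat) : Int)) 1 = [] :=
      PySem.List.pyRange_one_eq_nil le_rfl
    rw [hr0] at hfill
    simp only [List.map_nil, List.append_nil] at hfill
    have hsplit : PySem.List.pyRange 0 (n : Int) 1 =
        PySem.List.pyRange 0 (((min E.length n : Nat) : Int)) 1 ++
        PySem.List.pyRange (((min E.length n : Nat) : Int)) (n : Int) 1 :=
      PySem.List.pyRange_one_append 0 _ _ (by omega) (by exact_mod_cast Nat.min_le_right _ _)
    rw [hsplit, List.foldl_append]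
    have hfirst : (PySem.List.pyRange 0 (((min E.length n : Nat) : Int)) 1).foldl
        (fun d i => if d.contains i then d else d.insert i "UNKNOWN")
        (PySem.Dict.mk (PySem.List.enumerate (E.take n) 0)) =
        PySem.Dict.mk (PySem.List.enumerate (E.take n) 0) := by
      have : ∀ i ∈ PySem.List.pyRange 0 (((min E.length n : Nat) : Int)) 1,
          (PySem.Dict.mk (PySem.List.enumerate (E.take n) 0)).contains i = true := by
        intro i hi
        rw [PySem.List.mem_pyRange_one] at hi
        rw [PySem.Dict.contains_eq_decide_mem_keys, PySem.Dict.keys_mk,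
            PySem.List.map_fst_enumerate]
        simp [PySem.List.mem_pyRange_one, Nat.min_comm]
        omega
      generalize hl : PySem.List.pyRange 0 (((min E.length n : Nat) : Int)) 1 = l
      rw [hl] at this
      clear hl
      induction l with
      | nil => rfl
      | cons x l ihl =>
        rw [List.foldl_cons, if_pos (this x (by simp))]
        exact ihl (fun i hi => this i (by simp [hi]))
    rw [hfirst, hfill, final_list_eq]
    -- B's side: pvOwner on the bounds equals getD on the expansion
    have hb : pvBounds ttc = pvBoundsOf 0 (pvLof ttc) := by
      unfold pvBounds
      rw [bounds_fold ttc [] 0]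
      simp
    apply List.map_congr_left
    intro i hi
    refine Prod.ext rfl ?_
    rw [hb]
    have := owner_eq (pvLof ttc) 0 i (by
      intro q hq
      simp only [pvLof, List.mem_map, List.mem_filter] at hq
      obtain ⟨p, ⟨_, hp⟩, rfl⟩ := hq
      simpa using hp)
    simpa [pvExpanded] using this.symm
  · push_cast; omega

-- ===== VERDICT (by name: the statement is the Claim_ definition above) =====
theorem map_calls_to_tasks_spec : Claim_equal_map_calls_to_tasks := by
  intro gt ttc res _ _
  unfold Spec_map_calls_to_tasks
  exact map_calls_to_tasks_eq gt ttc res
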